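-- pv_equiv track=rewrite | github.com/llang629/sflyaddbook | sflyaddbook.py | match_pairs
-- ===== SOURCE A (Python) =====
-- import collections
--
-- def match_pairs(xin, yin):
--     """Match pairs from two lists."""
--     xsorted = collections.deque(sorted(xin))
--     ysorted = collections.deque(sorted(yin))
--     while xsorted and ysorted:
--         if xsorted[0] == ysorted[0]:
--             yield xsorted.popleft(), ysorted.popleft()
--         elif xsorted[0] < ysorted[0]:
--             yield xsorted.popleft(), 'N/A'
--         else:  # xsorted[0] > ysorted[0]
--             yield 'N/A', ysorted.popleft()
--     for xremain in xsorted: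
--         yield xremain, 'N/A'
--     for yremain in ysorted:
--         yield 'N/A', yremain
-- ===== SOURCE B (Python) =====
-- import collections
--
-- def match_pairs(xin, yin):
--     """Match pairs from two lists."""
--     cx = collections.Counter(xin)
--     cy = collections.Counter(yin)
--     for v in sorted(set(cx) | set(cy)):
--         a, b = cx[v], cy[v]
--         m = min(a, b)
--         for _ in range(m):
--             yield v, v
--         for _ in range(a - m):
--             yield v, 'N/A'
--         for _ in range(b - m):
--             yield 'N/A', v
-- ===== Notes on version B (the rewrite author's own statement) =====
-- stated objective: alternative
-- what changed: Replaces the two-deque element-by-element merge with two Counters plus one pass over the sorted distinct values, emitting min(a,b) matched pairs and the surplus of each value in closed form instead of popping fronts.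
import Mathlib
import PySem

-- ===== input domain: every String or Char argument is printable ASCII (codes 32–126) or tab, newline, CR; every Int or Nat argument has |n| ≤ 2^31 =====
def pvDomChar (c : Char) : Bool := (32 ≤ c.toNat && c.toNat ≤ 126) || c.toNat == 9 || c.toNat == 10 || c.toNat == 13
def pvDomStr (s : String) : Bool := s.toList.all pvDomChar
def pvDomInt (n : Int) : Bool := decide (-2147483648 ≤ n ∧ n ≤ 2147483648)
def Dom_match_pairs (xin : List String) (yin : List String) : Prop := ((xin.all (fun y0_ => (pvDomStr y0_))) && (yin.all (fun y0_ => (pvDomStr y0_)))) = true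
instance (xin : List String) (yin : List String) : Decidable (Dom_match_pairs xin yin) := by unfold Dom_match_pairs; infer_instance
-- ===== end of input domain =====

-- B replaces A's two-deque element merge by Counters and a single pass over the sorted
-- distinct values (alternative decomposition; same asymptotic cost).

-- ===== PORT A =====
-- the while/for loops of A: pop the smaller head, then drain the remainders
def mergeA : List String → List String → List (String × String)
  | [], ys => ys.map (fun y => ("N/A", y))
  | x :: xs, [] => (x, "N/A") :: mergeA xs []
  | x :: xs, y :: ys =>
    if x == y then (x, y) :: mergeA xs ys
    else if x < y then (x, "N/A") :: mergeA xs (y :: ys)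
    else ("N/A", y) :: mergeA (x :: xs) ys
termination_by xs ys => xs.length + ys.length

def match_pairs (xin : List String) (yin : List String) : List (String × String) :=
  mergeA (PySem.List.sorted xin (fun v => v) false) (PySem.List.sorted yin (fun v => v) false)

-- ===== PORT B =====
def match_pairs_alt (xin : List String) (yin : List String) : List (String × String) :=
  let cx := PySem.Dict.counter xin
  let cy := PySem.Dict.counter yin
  let keys := PySem.List.sorted (PySem.Set.union (PySem.Set.ofList cx.keys) cy.keys) (fun v => v) false
  keys.foldl (fun acc v =>
    let a := cx.getD v 0
    let b := cy.getD v 0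
    let m := min a b
    acc ++ List.replicate m.toNat (v, v)
        ++ List.replicate (a - m).toNat (v, "N/A")
        ++ List.replicate (b - m).toNat ("N/A", v)) []

-- ===== PRECONDITION & SPEC =====
def Spec_match_pairs (xin : List String) (yin : List String) (out : List (String × String)) : Prop := out = match_pairs_alt xin yin
instance (xin : List String) (yin : List String) (out : List (String × String)) : Decidable (Spec_match_pairs xin yin out) := by unfold Spec_match_pairs; infer_instance

-- ===== CLAIM (what is proved, stated in full; the proofs are below) =====
def Claim_equal_match_pairs : Prop := ∀ (xin : List String) (yin : List String), Dom_match_pairs xin yin → Spec_match_pairs xin yin (match_pairs xin yin)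

-- ===== LEMMAS AND PROOFS =====

-- per-value closed form of one group of B, as a function of the two counts
def groupOut (v : String) (a b : Nat) : List (String × String) :=
  List.replicate (min a b) (v, v) ++ List.replicate (a - min a b) (v, "N/A")
    ++ List.replicate (b - min a b) ("N/A", v)

lemma mergeA_nil_left (ys : List String) : mergeA [] ys = ys.map (fun y => ("N/A", y)) := by
  cases ys <;> simp [mergeA]

lemma mergeA_nil_right (xs : List String) : mergeA xs [] = xs.map (fun x => (x, "N/A")) := by
  induction xs with
  | nil => simp [mergeA]
  | cons x xs ih => simp [mergeA, ih]

lemma mergeA_right_gt (v : String) (b : Nat) (xs ys : List String)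
    (hx : ∀ x ∈ xs, v < x) :
    mergeA xs (List.replicate b v ++ ys)
      = List.replicate b ("N/A", v) ++ mergeA xs ys := by
  induction b with
  | zero => simp
  | succ b ih =>
    have step : mergeA xs (v :: (List.replicate b v ++ ys))
        = ("N/A", v) :: mergeA xs (List.replicate b v ++ ys) := by
      cases xs with
      | nil => simp [mergeA_nil_left]
      | cons x xs' =>
        have hlt : v < x := hx x (by simp)
        have hne : ¬ (x == v) := by
          simp only [beq_iff_eq]
          exact fun h => absurd hlt (h ▸ lt_irrefl x)
        have hnlt : ¬ x < v := not_lt_of_gt hlt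
        simp [mergeA, hne, hnlt]
    simpa [List.replicate_succ, step] using congrArg (("N/A", v) :: ·) ih

lemma mergeA_left_gt (v : String) (a : Nat) (xs ys : List String)
    (hy : ∀ y ∈ ys, v < y) :
    mergeA (List.replicate a v ++ xs) ys
      = List.replicate a (v, "N/A") ++ mergeA xs ys := by
  induction a with
  | zero => simp
  | succ a ih =>
    have step : mergeA (v :: (List.replicate a v ++ xs)) ys
        = (v, "N/A") :: mergeA (List.replicate a v ++ xs) ys := by
      cases ys with
      | nil => simp [mergeA_nil_right]
      | cons y ys' =>
        have hlt : v < y := hy y (by simp)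
        have hne : ¬ (v == y) := by
          simp only [beq_iff_eq]
          exact fun h => absurd hlt (h ▸ lt_irrefl v)
        simp [mergeA, hne, hlt]
    simpa [List.replicate_succ, step] using congrArg ((v, "N/A") :: ·) ih

lemma merge_group (v : String) (a b : Nat) (xs ys : List String)
    (hx : ∀ x ∈ xs, v < x) (hy : ∀ y ∈ ys, v < y) :
    mergeA (List.replicate a v ++ xs) (List.replicate b v ++ ys)
      = groupOut v a b ++ mergeA xs ys := by
  induction a generalizing b with
  | zero =>
    simp [groupOut, mergeA_right_gt v b xs ys hx]
  | succ a ih =>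
    cases b with
    | zero =>
      simp [groupOut, mergeA_left_gt v (a + 1) xs ys hy]
    | succ b =>
      have hv : (v == v) = true := by simp
      have : mergeA (v :: (List.replicate a v ++ xs)) (v :: (List.replicate b v ++ ys))
          = (v, v) :: mergeA (List.replicate a v ++ xs) (List.replicate b v ++ ys) := by
        simp [mergeA]
      rw [List.replicate_succ, List.replicate_succ, List.cons_append, List.cons_append, this,
        ih b]
      simp [groupOut, Nat.succ_min_succ, List.replicate_succ, Nat.succ_sub_succ]

-- split a sorted list whose minimum is v into its v-block and the strict remainder
lemma sorted_split (v : String) (xs : List String)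
    (hs : xs.Pairwise (· ≤ ·)) (hmin : ∀ x ∈ xs, v ≤ x) :
    xs = List.replicate (xs.count v) v ++ xs.filter (fun x => x ≠ v)
      ∧ (xs.filter (fun x => x ≠ v)).Pairwise (· ≤ ·)
      ∧ ∀ x ∈ xs.filter (fun x => x ≠ v), v < x := by
  induction xs with
  | nil => simp
  | cons x xs ih =>
    have hs' := (List.pairwise_cons.mp hs).2
    have hxle := (List.pairwise_cons.mp hs).1
    by_cases hxv : x = v
    · subst hxv
      obtain ⟨h1, h2, h3⟩ := ih hs' (fun z hz => hmin z (by simp [hz]))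
      refine ⟨?_, ?_, ?_⟩
      · simpa [List.count_cons, List.replicate_succ] using congrArg (x :: ·) h1
      · simpa using h2
      · intro z hz; exact h3 z (by simpa using hz)
    · have hvx : v < x := lt_of_le_of_ne (hmin x (by simp)) (fun h => hxv h.symm)
      have hnot : v ∉ x :: xs := by
        intro hmem
        rcases List.mem_cons.mp hmem with h | h
        · exact hxv h.symm
        · exact absurd (hxle v h) (not_le_of_gt hvx)
      have hcnt : (x :: xs).count v = 0 := List.count_eq_zero.mpr hnot
      have hfilter : (x :: xs).filter (fun z => z ≠ v) = x :: xs := by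
        refine List.filter_eq_self.mpr ?_
        intro z hz
        rcases List.mem_cons.mp hz with h | h
        · simp [h, hxv]
        · have hvz : v < z := lt_of_lt_of_le hvx (hxle z h)
          simp [ne_of_gt hvz]
      refine ⟨?_, by rw [hfilter]; exact hs, ?_⟩
      · rw [hcnt]
        simp only [List.replicate_zero, List.nil_append]
        exact hfilter.symm
      intro z hz
      rw [hfilter] at hz
      rcases List.mem_cons.mp hz with h | h
      · exact h ▸ hvx
      · exact lt_of_lt_of_le hvx (hxle z h)

-- the heart: on sorted inputs whose values all lie in the strictly increasing key list ks,
-- A's merge is the concatenation of the per-value closed forms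
lemma mergeA_eq_flatMap (ks : List String) :
    ∀ (xs ys : List String), ks.Pairwise (· < ·) →
    xs.Pairwise (· ≤ ·) → ys.Pairwise (· ≤ ·) →
    (∀ x ∈ xs, x ∈ ks) → (∀ y ∈ ys, y ∈ ks) →
    mergeA xs ys = ks.flatMap (fun v => groupOut v (xs.count v) (ys.count v)) := by
  induction ks with
  | nil =>
    intro xs ys _ _ _ hxk hyk
    have hx : xs = [] := List.eq_nil_iff_forall_not_mem.mpr (fun a ha => by simpa using hxk a ha)
    have hy : ys = [] := List.eq_nil_iff_forall_not_mem.mpr (fun a ha => by simpa using hyk a ha)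
    simp [hx, hy, mergeA]
  | cons v ks ih =>
    intro xs ys hks hxs hys hxk hyk
    have hks' := (List.pairwise_cons.mp hks).2
    have hvlt := (List.pairwise_cons.mp hks).1
    have hxmin : ∀ x ∈ xs, v ≤ x := by
      intro x hx
      rcases List.mem_cons.mp (hxk x hx) with h | h
      · exact le_of_eq h.symm
      · exact le_of_lt (hvlt x h)
    have hymin : ∀ y ∈ ys, v ≤ y := by
      intro y hy
      rcases List.mem_cons.mp (hyk y hy) with h | h
      · exact le_of_eq h.symm
      · exact le_of_lt (hvlt y h)
    obtain ⟨hxeq, hxs', hxgt⟩ := sorted_split v xs hxs hxmin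
    obtain ⟨hyeq, hys', hygt⟩ := sorted_split v ys hys hymin
    set xs' := xs.filter (fun x => x ≠ v) with hxdef
    set ys' := ys.filter (fun y => y ≠ v) with hydef
    have hxk' : ∀ x ∈ xs', x ∈ ks := by
      intro x hx
      have hmem : x ∈ xs := List.mem_of_mem_filter hx
      have hne : x ≠ v := by simpa using (List.of_mem_filter hx)
      rcases List.mem_cons.mp (hxk x hmem) with h | h
      · exact absurd h hne
      · exact h
    have hyk' : ∀ y ∈ ys', y ∈ ks := by
      intro y hy
      have hmem : y ∈ ys := List.mem_of_mem_filter hy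
      have hne : y ≠ v := by simpa using (List.of_mem_filter hy)
      rcases List.mem_cons.mp (hyk y hmem) with h | h
      · exact absurd h hne
      · exact h
    have hmain : mergeA xs ys = groupOut v (xs.count v) (ys.count v) ++ mergeA xs' ys' := by
      conv_lhs => rw [hxeq, hyeq]
      exact merge_group v (xs.count v) (ys.count v) xs' ys' hxgt hygt
    have hrec := ih xs' ys' hks' hxs' hys' hxk' hyk'
    have hcnt : ∀ u ∈ ks, xs'.count u = xs.count u ∧ ys'.count u = ys.count u := by
      intro u hu
      have hune : u ≠ v := by
        intro he; subst he; exact absurd (hvlt u hu) (lt_irrefl u)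
      constructor
      · rw [hxdef, List.count_filter]; simp [hune]
      · rw [hydef, List.count_filter]; simp [hune]
    have hflat : ks.flatMap (fun u => groupOut u (xs'.count u) (ys'.count u))
        = ks.flatMap (fun u => groupOut u (xs.count u) (ys.count u)) := by
      apply List.flatMap_congr
      intro u hu
      rw [(hcnt u hu).1, (hcnt u hu).2]
    rw [hmain, hrec, hflat, List.flatMap_cons]

-- B's accumulator loop over the keys, in flatMap form
lemma foldl3 {α β : Type} (g1 g2 g3 : α → List β) (l : List α) (acc : List β) :
    l.foldl (fun acc v => acc ++ g1 v ++ g2 v ++ g3 v) acc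
      = acc ++ l.flatMap (fun v => g1 v ++ g2 v ++ g3 v) := by
  induction l generalizing acc with
  | nil => simp
  | cons v l ih => rw [List.foldl_cons, ih]; simp [List.append_assoc]

-- ===== VERDICT (by name: the statement is the Claim_ definition above) =====
theorem match_pairs_spec : Claim_equal_match_pairs := by
  intro xin yin _
  unfold Spec_match_pairs match_pairs match_pairs_alt
  simp only []
  set S : PySem.Set String :=
    PySem.Set.union (PySem.Set.ofList (PySem.Dict.counter xin).keys) (PySem.Dict.counter yin).keys with hS
  set ks : List String := PySem.List.sorted S (fun v => v) false with hks
  have hSnodup : S.Nodup := PySem.Set.nodup_union _ _ (PySem.Set.nodup_ofList _)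
  have hmemS : ∀ x : String, x ∈ xin ∨ x ∈ yin → x ∈ S := by
    intro x hx
    rw [hS, PySem.Set.mem_union]
    rcases hx with h | h
    · left
      rw [PySem.Set.mem_ofList, PySem.Dict.keys_counter, PySem.Set.mem_ofList]
      exact h
    · right
      rw [PySem.Dict.keys_counter, PySem.Set.mem_ofList]
      exact h
  have hksle : ks.Pairwise (· ≤ ·) := PySem.List.sorted_pairwise S (fun v => v)
  have hksnodup : ks.Nodup := ((PySem.List.sorted_perm S (fun v => v) false).nodup_iff).mpr hSnodup
  have hkslt : ks.Pairwise (· < ·) :=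
    (hksle.and hksnodup).imp (fun h => lt_of_le_of_ne h.1 h.2)
  set sx : List String := PySem.List.sorted xin (fun v => v) false with hsx
  set sy : List String := PySem.List.sorted yin (fun v => v) false with hsy
  have hcx : ∀ v, sx.count v = xin.count v := fun v =>
    (PySem.List.sorted_perm xin (fun v => v) false).count_eq v
  have hcy : ∀ v, sy.count v = yin.count v := fun v =>
    (PySem.List.sorted_perm yin (fun v => v) false).count_eq v
  have hA : mergeA sx sy = ks.flatMap (fun v => groupOut v (sx.count v) (sy.count v)) := by
    refine mergeA_eq_flatMap ks sx sy hkslt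
      (PySem.List.sorted_pairwise xin (fun v => v))
      (PySem.List.sorted_pairwise yin (fun v => v)) ?_ ?_
    · intro x hx
      rw [hks, PySem.List.mem_sorted]
      exact hmemS x (Or.inl (by rw [hsx, PySem.List.mem_sorted] at hx; exact hx))
    · intro y hy
      rw [hks, PySem.List.mem_sorted]
      exact hmemS y (Or.inr (by rw [hsy, PySem.List.mem_sorted] at hy; exact hy))
  rw [hA, foldl3, List.nil_append]
  apply List.flatMap_congr
  intro v _
  have ha : (PySem.Dict.counter xin).getD v 0 = (xin.count v : Int) :=
    PySem.Dict.getD_counter xin v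
  have hb : (PySem.Dict.counter yin).getD v 0 = (yin.count v : Int) :=
    PySem.Dict.getD_counter yin v
  rw [ha, hb, hcx v, hcy v]
  set a : Nat := xin.count v
  set b : Nat := yin.count v
  have h1 : (min (a : Int) (b : Int)).toNat = min a b := by omega
  have h2 : ((a : Int) - min (a : Int) (b : Int)).toNat = a - min a b := by omega
  have h3 : ((b : Int) - min (a : Int) (b : Int)).toNat = b - min a b := by omega
  rw [groupOut, h1, h2, h3, List.append_assoc]
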